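-- pv_equiv track=rewrite | github.com/ge0z/CTF-WU | 404CTF23/PROGRAMMATION/Des_mots_des_mots_des_mots.py | rule3_vowelMove
-- ===== SOURCE A (Python) =====
-- VOWEL = "aeiouyAEIOUY"
--
-- def rule3_vowelMove(tin, direction):
--     letterNRank = []
--     vowelList = []
--
--     # 1. numerotation du rang des lettres
--     for i in range(len(tin)):
--         #letterNRank([lettre, #lettre_dans_le_mot])
--         letterNRank.append([tin[i],i])
--
--     # 2. extraction des voyelles et de leurs rangs
--     for letter in letterNRank:
--         if letter[0] in VOWEL:
--             vowelList.append(list(letter))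
--
--     # 3. changement du rang des voyelles
--     for i in range(len(vowelList)):
--         if direction == 'left':
--             letterNRank[vowelList[i][1]][1] = vowelList[i-1][1]
--         else:
--             letterNRank[vowelList[i][1]][1] = vowelList[(i+1)%len(vowelList)][1]
--
--     # 4. trie des lettres et creation du nouveau mot
--     tout=""
--     for letter in sorted(letterNRank, key=lambda letterNRank: letterNRank[1]) :
--         tout += letter[0]
--     return tout
-- ===== SOURCE B (Python) =====
-- VOWEL = "aeiouyAEIOUY"
--
-- def rule3_vowelMove(tin, direction):
--     # O(n): collect vowel slots, rotate the vowels among those slots, write once.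
--     pos = [i for i, c in enumerate(tin) if c in VOWEL]
--     vs = [tin[i] for i in pos]
--     if vs:
--         vs = vs[1:] + vs[:1] if direction == 'left' else vs[-1:] + vs[:-1]
--     out = list(tin)
--     for i, c in zip(pos, vs):
--         out[i] = c
--     return ''.join(out)
-- ===== Notes on version B (the rewrite author's own statement) =====
-- stated objective: faster
-- what changed: B collects the vowel slots once, rotates the vowel characters and writes each directly back into its slot, replacing A's rank-list bookkeeping and full sort by key.
import Mathlib
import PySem

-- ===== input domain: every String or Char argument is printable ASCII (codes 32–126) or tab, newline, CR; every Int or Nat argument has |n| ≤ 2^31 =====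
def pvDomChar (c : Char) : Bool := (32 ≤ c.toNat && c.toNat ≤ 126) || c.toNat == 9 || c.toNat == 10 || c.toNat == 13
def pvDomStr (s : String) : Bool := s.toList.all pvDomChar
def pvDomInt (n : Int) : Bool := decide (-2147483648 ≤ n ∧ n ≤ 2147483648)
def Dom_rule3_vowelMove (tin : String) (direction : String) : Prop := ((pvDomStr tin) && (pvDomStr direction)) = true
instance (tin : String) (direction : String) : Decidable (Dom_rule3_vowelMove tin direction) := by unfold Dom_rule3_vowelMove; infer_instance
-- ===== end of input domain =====

-- B replaces A's rank relabelling + sort by a single O(n) pass: rotate the vowels among their slots in place.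
def pvVOWEL : List Char := "aeiouyAEIOUY".toList

-- ===== PORT A =====
def rule3_vowelMove (tin : String) (direction : String) : String :=
  let tl := tin.toList
  -- 1. numerotation du rang des lettres
  let letterNRank : List (Char × Int) :=
    (PySem.List.pyRange 0 (tl.length : Int) 1).foldl
      (fun acc i => acc ++ [(PySem.List.pyGetD tl i ' ', i)]) []
  -- 2. extraction des voyelles et de leurs rangs
  let vowelList : List (Char × Int) :=
    letterNRank.foldl (fun acc p => if pvVOWEL.contains p.1 then acc ++ [p] else acc) []
  -- 3. changement du rang des voyelles
  let letterNRank2 : List (Char × Int) :=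
    (PySem.List.pyRange 0 (vowelList.length : Int) 1).foldl
      (fun cur i =>
        if direction = "left" then
          let tgt := (PySem.List.pyGetD vowelList i (' ', 0)).2
          let newr := (PySem.List.pyGetD vowelList (i - 1) (' ', 0)).2
          PySem.List.pySetD cur tgt ((PySem.List.pyGetD cur tgt (' ', 0)).1, newr)
        else
          let tgt := (PySem.List.pyGetD vowelList i (' ', 0)).2
          let newr := (PySem.List.pyGetD vowelList
              (PySem.Int.mod (i + 1) (vowelList.length : Int)) (' ', 0)).2
          PySem.List.pySetD cur tgt ((PySem.List.pyGetD cur tgt (' ', 0)).1, newr))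
      letterNRank
  -- 4. trie des lettres et creation du nouveau mot
  let tout : List Char :=
    (PySem.List.sorted letterNRank2 (fun p => p.2) false).foldl (fun s p => s ++ [p.1]) []
  String.ofList tout

-- ===== PORT B =====
def rule3_vowelMove_alt (tin : String) (direction : String) : String :=
  let tl := tin.toList
  let pos : List Int :=
    ((PySem.List.enumerate tl 0).filter (fun p => pvVOWEL.contains p.2)).map (fun p => p.1)
  let vs : List Char := pos.map (fun i => PySem.List.pyGetD tl i ' ')
  let vs2 : List Char :=
    if vs ≠ [] then
      if direction = "left" then
        PySem.List.slice vs (some 1) none ++ PySem.List.slice vs none (some 1)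
      else
        PySem.List.slice vs (some (-1)) none ++ PySem.List.slice vs none (some (-1))
    else vs
  let out : List Char := (pos.zip vs2).foldl (fun acc pc => PySem.List.pySetD acc pc.1 pc.2) tl
  String.ofList out

-- ===== PRECONDITION & SPEC =====
def Spec_rule3_vowelMove (tin : String) (direction : String) (out : String) : Prop := out = rule3_vowelMove_alt tin direction
instance (tin : String) (direction : String) (out : String) : Decidable (Spec_rule3_vowelMove tin direction out) := by unfold Spec_rule3_vowelMove; infer_instance

-- ===== CLAIM (what is proved, stated in full; the proofs are below) =====
def Claim_equal_rule3_vowelMove : Prop := ∀ (tin : String) (direction : String), Dom_rule3_vowelMove tin direction → Spec_rule3_vowelMove tin direction (rule3_vowelMove tin direction)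


-- ===== LEMMAS AND PROOFS =====

-- abbreviations used only by the proofs
def pvC (l : List Char) (j : Nat) : Char := l.getD j ' '
def pvP (l : List Char) : List Nat :=
  (List.range l.length).filter (fun j => pvVOWEL.contains (pvC l j))
-- rank function after the first m iterations of A's step-3 loop (shift s)
def pvRankU (P : List Nat) (s m j : Nat) : Nat :=
  if j ∈ P.take m then P.getD ((List.idxOf j P + s) % P.length) 0 else j
-- the character B writes at position j (vowel rotation by t slots)
def pvOut (l : List Char) (t : Nat) (j : Nat) : Char :=
  if j ∈ pvP l then pvC l ((pvP l).getD ((List.idxOf j (pvP l) + t) % (pvP l).length) 0)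
  else pvC l j

theorem pvP_lt {l : List Char} {j : Nat} (h : j ∈ pvP l) : j < l.length := by
  have := List.of_mem_filter h
  have hm := List.mem_of_mem_filter h
  simpa using List.mem_range.mp hm

theorem pvP_nodup (l : List Char) : (pvP l).Nodup :=
  (List.nodup_range).filter _

theorem getD_mem {P : List Nat} {m : Nat} (h : m < P.length) : P.getD m 0 ∈ P := by
  rw [List.getD_eq_getElem _ _ h]; exact List.getElem_mem h

theorem idxOf_getD {P : List Nat} (hnd : P.Nodup) {m : Nat} (h : m < P.length) :
    List.idxOf (P.getD m 0) P = m := by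
  rw [List.getD_eq_getElem _ _ h]; exact hnd.idxOf_getElem m h

theorem getD_idxOf {P : List Nat} {a : Nat} (h : a ∈ P) :
    P.getD (List.idxOf a P) 0 = a := by
  rw [List.getD_eq_getElem _ _ (List.idxOf_lt_length_of_mem h)]
  exact List.getElem_idxOf _

theorem set_map_range {α : Type} (f : Nat → α) {n p : Nat} (_hp : p < n) (v : α) :
    (((List.range n).map f).set p v) = (List.range n).map (fun j => if j = p then v else f j) := by
  apply List.ext_getElem (by simp)
  intro i h1 h2
  simp only [List.getElem_set, List.getElem_map, List.getElem_range]
  by_cases hip : p = i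
  · simp [hip]
  · rw [if_neg hip, if_neg (fun h : i = p => hip h.symm)]

theorem getD_map {α : Type} (P : List Nat) (f : Nat → α) (d : α) {m : Nat} (h : m < P.length) :
    (P.map f).getD m d = f (P.getD m 0) := by
  rw [List.getD_eq_getElem _ _ (by simpa using h), List.getD_eq_getElem _ _ h, List.getElem_map]

theorem map_eq_map_range {α : Type} (P : List Nat) (f : Nat → α) :
    P.map f = (List.range P.length).map (fun i => f (P.getD i 0)) := by
  apply List.ext_getElem (by simp)
  intro i h1 h2
  have hi : i < P.length := by simpa using h1
  simp [List.getElem?_eq_getElem hi]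

theorem map_pvC (l : List Char) : (List.range l.length).map (pvC l) = l := by
  apply List.ext_getElem (by simp)
  intro i h1 h2
  simp [pvC, List.getElem?_eq_getElem h2]

-- mod arithmetic used by the permutation argument
theorem mod_shift_cancel {k s t x : Nat} (_hk : 0 < k) (hst : (s + t) % k = 0) (hx : x < k) :
    ((x + t) % k + s) % k = x := by
  rw [Nat.mod_add_mod, show x + t + s = x + (s + t) from by ring, Nat.add_mod, hst,
    Nat.add_zero, Nat.mod_mod_of_dvd _ dvd_rfl, Nat.mod_eq_of_lt hx]

theorem add_mod_cancel_lt {k a b s : Nat} (ha : a < k) (hb : b < k)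
    (h : (a + s) % k = (b + s) % k) : a = b := by
  have := Nat.ModEq.add_right_cancel' s (h : (a + s) ≡ (b + s) [MOD k])
  have h2 : a % k = b % k := this
  rwa [Nat.mod_eq_of_lt ha, Nat.mod_eq_of_lt hb] at h2

-- ===== A-side characterisations =====
theorem A_step1 (l : List Char) :
    (PySem.List.pyRange 0 (l.length : Int) 1).foldl
        (fun acc i => acc ++ [(PySem.List.pyGetD l i ' ', i)]) []
      = (List.range l.length).map (fun j => (pvC l j, (j : Int))) := by
  rw [PySem.List.pyRange_zero_natCast, PySem.List.foldl_append_singleton_eq_map]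
  simp [List.map_map, pvC, Function.comp]

theorem A_step2 (l : List Char) :
    ((List.range l.length).map (fun j => (pvC l j, (j : Int)))).foldl
        (fun acc p => if pvVOWEL.contains p.1 then acc ++ [p] else acc) []
      = (pvP l).map (fun j => (pvC l j, (j : Int))) := by
  refine (PySem.List.foldl_append_if (fun (p : Char × Int) => pvVOWEL.contains p.1)
    (fun p => p) _ []).trans ?_
  simp [List.filter_map, pvP, Function.comp_def]

theorem A_loop (l : List Char) (s : Nat)
    (body : List (Char × Int) → Int → List (Char × Int))
    (hbody : ∀ (cur : List (Char × Int)) (m : Nat), m < (pvP l).length →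
      body cur (m : Int) =
        PySem.List.pySetD cur ((pvP l).getD m 0 : Int)
          ((PySem.List.pyGetD cur ((pvP l).getD m 0 : Int) (' ', 0)).1,
           ((pvP l).getD ((m + s) % (pvP l).length) 0 : Int))) :
    ∀ (m : Nat), m ≤ (pvP l).length →
      (((List.range m).map (fun i : Nat => (i : Int))).foldl body
          ((List.range l.length).map (fun j => (pvC l j, (j : Int)))))
        = (List.range l.length).map (fun j => (pvC l j, (pvRankU (pvP l) s m j : Int))) := by
  intro m
  induction m with
  | zero =>
    intro _
    simp only [List.range_zero, List.map_nil, List.foldl_nil]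
    refine List.map_congr_left ?_
    intro j _
    simp [pvRankU]
  | succ m ih =>
    intro hm
    have hmk : m < (pvP l).length := by omega
    rw [List.range_succ, List.map_append, List.foldl_append, ih (by omega)]
    simp only [List.map_cons, List.map_nil, List.foldl_cons, List.foldl_nil]
    rw [hbody _ m hmk]
    have hpn : (pvP l).getD m 0 < l.length := pvP_lt (getD_mem hmk)
    have hget : (PySem.List.pyGetD
        ((List.range l.length).map (fun j => (pvC l j, (pvRankU (pvP l) s m j : Int))))
        (((pvP l).getD m 0 : Nat) : Int) (' ', 0))
        = (pvC l ((pvP l).getD m 0), (pvRankU (pvP l) s m ((pvP l).getD m 0) : Int)) := by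
      rw [PySem.List.pyGetD_natCast]
      rw [List.getD_eq_getElem _ _ (by simpa using hpn)]
      simp
    rw [hget, PySem.List.pySetD_natCast, set_map_range _ hpn]
    have hPm : (pvP l)[m]? = some ((pvP l).getD m 0) := by
      rw [List.getElem?_eq_getElem hmk, List.getD_eq_getElem _ _ hmk]
    refine List.map_congr_left ?_
    intro j hj
    by_cases hjp : j = (pvP l).getD m 0
    · rw [if_pos hjp]
      subst hjp
      have hmem : (pvP l).getD m 0 ∈ (pvP l).take (m + 1) := by
        rw [List.take_add_one, List.mem_append]
        right
        rw [hPm]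
        exact List.mem_singleton.mpr rfl
      simp only [pvRankU]
      rw [if_pos hmem, idxOf_getD (pvP_nodup l) hmk]
    · rw [if_neg hjp]
      have hiff : j ∈ (pvP l).take (m + 1) ↔ j ∈ (pvP l).take m := by
        rw [List.take_add_one, List.mem_append, hPm]
        simp only [Option.toList_some, List.mem_singleton]
        exact or_iff_left hjp
      simp only [pvRankU]
      rw [if_congr hiff rfl rfl]

theorem A_body_left (l : List Char) (cur : List (Char × Int)) (m : Nat)
    (hm : m < (pvP l).length) :
    (let tgt := (PySem.List.pyGetD ((pvP l).map (fun j => (pvC l j, (j : Int)))) (m : Int) (' ', 0)).2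
     let newr := (PySem.List.pyGetD ((pvP l).map (fun j => (pvC l j, (j : Int)))) ((m : Int) - 1) (' ', 0)).2
     PySem.List.pySetD cur tgt ((PySem.List.pyGetD cur tgt (' ', 0)).1, newr))
      = PySem.List.pySetD cur ((pvP l).getD m 0 : Int)
          ((PySem.List.pyGetD cur ((pvP l).getD m 0 : Int) (' ', 0)).1,
           ((pvP l).getD ((m + ((pvP l).length - 1)) % (pvP l).length) 0 : Int)) := by
  have hk : 0 < (pvP l).length := by omega
  have htgt : PySem.List.pyGetD ((pvP l).map (fun j => (pvC l j, (j : Int)))) (m : Int) (' ', 0)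
      = (pvC l ((pvP l).getD m 0), ((pvP l).getD m 0 : Int)) := by
    rw [PySem.List.pyGetD_natCast, getD_map _ _ _ hm]
  have hnewr : PySem.List.pyGetD ((pvP l).map (fun j => (pvC l j, (j : Int)))) ((m : Int) - 1) (' ', 0)
      = (pvC l ((pvP l).getD ((m + ((pvP l).length - 1)) % (pvP l).length) 0),
         ((pvP l).getD ((m + ((pvP l).length - 1)) % (pvP l).length) 0 : Int)) := by
    rcases Nat.eq_zero_or_pos m with hm0 | hm1
    · subst hm0
      have hne : (pvP l).map (fun j => (pvC l j, (j : Int))) ≠ [] :=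
        List.ne_nil_of_length_pos (by simpa using hk)
      rw [show ((0 : Nat) : Int) - 1 = -1 from by norm_num,
        PySem.List.pyGetD_neg_one _ _ hne, List.getLast_eq_getElem,
        show (0 + ((pvP l).length - 1)) % (pvP l).length = (pvP l).length - 1 from by
          rw [Nat.zero_add]; exact Nat.mod_eq_of_lt (by omega)]
      simp only [List.length_map, List.getElem_map]
      rw [List.getD_eq_getElem _ _ (by omega)]
    · rw [show (m : Int) - 1 = ((m - 1 : Nat) : Int) from by push_cast [hm1]; ring,
        PySem.List.pyGetD_natCast, getD_map _ _ _ (by omega : m - 1 < (pvP l).length),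
        show (m + ((pvP l).length - 1)) % (pvP l).length = m - 1 from by
          rw [show m + ((pvP l).length - 1) = (m - 1) + (pvP l).length from by omega,
            Nat.add_mod_right, Nat.mod_eq_of_lt (by omega)]]
  simp only [htgt, hnewr]

theorem A_body_right (l : List Char) (cur : List (Char × Int)) (m : Nat)
    (hm : m < (pvP l).length) :
    (let tgt := (PySem.List.pyGetD ((pvP l).map (fun j => (pvC l j, (j : Int)))) (m : Int) (' ', 0)).2
     let newr := (PySem.List.pyGetD ((pvP l).map (fun j => (pvC l j, (j : Int))))
        (PySem.Int.mod ((m : Int) + 1) ((pvP l).length : Int)) (' ', 0)).2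
     PySem.List.pySetD cur tgt ((PySem.List.pyGetD cur tgt (' ', 0)).1, newr))
      = PySem.List.pySetD cur ((pvP l).getD m 0 : Int)
          ((PySem.List.pyGetD cur ((pvP l).getD m 0 : Int) (' ', 0)).1,
           ((pvP l).getD ((m + 1) % (pvP l).length) 0 : Int)) := by
  have hk : 0 < (pvP l).length := by omega
  have htgt : PySem.List.pyGetD ((pvP l).map (fun j => (pvC l j, (j : Int)))) (m : Int) (' ', 0)
      = (pvC l ((pvP l).getD m 0), ((pvP l).getD m 0 : Int)) := by
    rw [PySem.List.pyGetD_natCast, getD_map _ _ _ hm]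
  have hnewr : PySem.List.pyGetD ((pvP l).map (fun j => (pvC l j, (j : Int))))
      (PySem.Int.mod ((m : Int) + 1) ((pvP l).length : Int)) (' ', 0)
      = (pvC l ((pvP l).getD ((m + 1) % (pvP l).length) 0),
         ((pvP l).getD ((m + 1) % (pvP l).length) 0 : Int)) := by
    rw [show (m : Int) + 1 = ((m + 1 : Nat) : Int) from by push_cast; ring,
      PySem.Int.mod_natCast, PySem.List.pyGetD_natCast,
      getD_map _ _ _ (Nat.mod_lt _ hk)]
  simp only [htgt, hnewr]

-- ===== B-side characterisations =====
theorem B_pos (l : List Char) :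
    ((PySem.List.enumerate l 0).filter (fun p => pvVOWEL.contains p.2)).map (fun p => p.1)
      = (pvP l).map (fun j : Nat => (j : Int)) := by
  rw [PySem.List.enumerate_eq_map_pyRange l ' ', PySem.List.len_eq, PySem.List.pyRange_zero_natCast]
  simp [List.map_map, List.filter_map, pvP, pvC, Function.comp_def]

theorem rot_left {α : Type} (v : List α) (d : α) (h : v ≠ []) :
    v.tail ++ v.take 1 = (List.range v.length).map (fun i => v.getD ((i + 1) % v.length) d) := by
  have hk : 0 < v.length := List.length_pos_of_ne_nil h
  apply List.ext_getElem
  · simp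
    omega
  intro i h1 h2
  have hi : i < v.length := by simpa using h2
  simp only [List.getElem_map, List.getElem_range]
  rw [List.getElem_append]
  by_cases hit : i < v.tail.length
  · rw [dif_pos hit, List.getElem_tail]
    have hlt : i + 1 < v.length := by simp [List.length_tail] at hit; omega
    rw [Nat.mod_eq_of_lt hlt, List.getD_eq_getElem _ _ hlt]
  · rw [dif_neg hit]
    have hieq : i = v.length - 1 := by simp [List.length_tail] at hit ⊢; omega
    have h0 : (i + 1) % v.length = 0 := by rw [hieq, Nat.sub_add_cancel hk, Nat.mod_self]
    rw [h0, List.getElem_take, List.getD_eq_getElem _ _ hk]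
    congr 1
    simp only [List.length_tail]
    omega

theorem rot_right {α : Type} (v : List α) (d : α) (h : v ≠ []) :
    v.drop (v.length - 1) ++ v.dropLast
      = (List.range v.length).map (fun i => v.getD ((i + (v.length - 1)) % v.length) d) := by
  have hk : 0 < v.length := List.length_pos_of_ne_nil h
  apply List.ext_getElem
  · simp
  intro i h1 h2
  have hi : i < v.length := by simpa using h2
  simp only [List.getElem_map, List.getElem_range]
  rw [List.getElem_append]
  by_cases hit : i < (v.drop (v.length - 1)).length
  · rw [dif_pos hit, List.getElem_drop]
    have hi0 : i = 0 := by simp at hit; omega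
    subst hi0
    rw [show (0 + (v.length - 1)) % v.length = v.length - 1 from by
        rw [Nat.zero_add]; exact Nat.mod_eq_of_lt (by omega),
      List.getD_eq_getElem _ _ (by omega)]
    simp
  · rw [dif_neg hit]
    have hi1 : 1 ≤ i := by simp at hit; omega
    have hmod : (i + (v.length - 1)) % v.length = i - 1 := by
      rw [show i + (v.length - 1) = (i - 1) + v.length from by omega,
        Nat.add_mod_right, Nat.mod_eq_of_lt (by omega)]
    rw [hmod, List.getElem_dropLast, List.getD_eq_getElem _ _ (by omega)]
    congr 1
    simp only [List.length_drop]
    omega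

theorem B_loop (l : List Char) (t : Nat) :
    ∀ (m : Nat), m ≤ (pvP l).length →
      (((List.range m).map (fun i =>
            (((pvP l).getD i 0 : Int), pvC l ((pvP l).getD ((i + t) % (pvP l).length) 0)))).foldl
          (fun acc pc => PySem.List.pySetD acc pc.1 pc.2) l)
        = (List.range l.length).map (fun j =>
            if j ∈ (pvP l).take m
            then pvC l ((pvP l).getD ((List.idxOf j (pvP l) + t) % (pvP l).length) 0)
            else pvC l j) := by
  intro m
  induction m with
  | zero =>
    intro _
    simp only [List.range_zero, List.map_nil, List.foldl_nil, List.take_zero,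
      List.not_mem_nil, if_false]
    exact (map_pvC l).symm
  | succ m ih =>
    intro hm
    have hmk : m < (pvP l).length := by omega
    rw [List.range_succ, List.map_append, List.foldl_append, ih (by omega)]
    simp only [List.map_cons, List.map_nil, List.foldl_cons, List.foldl_nil]
    have hpn : (pvP l).getD m 0 < l.length := pvP_lt (getD_mem hmk)
    rw [PySem.List.pySetD_natCast, set_map_range _ hpn]
    have hPm : (pvP l)[m]? = some ((pvP l).getD m 0) := by
      rw [List.getElem?_eq_getElem hmk, List.getD_eq_getElem _ _ hmk]
    refine List.map_congr_left ?_
    intro j hj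
    by_cases hjp : j = (pvP l).getD m 0
    · rw [if_pos hjp]
      subst hjp
      have hmem : (pvP l).getD m 0 ∈ (pvP l).take (m + 1) := by
        rw [List.take_add_one, List.mem_append]
        right
        rw [hPm]
        exact List.mem_singleton.mpr rfl
      rw [if_pos hmem, idxOf_getD (pvP_nodup l) hmk]
    · rw [if_neg hjp]
      have hiff : j ∈ (pvP l).take (m + 1) ↔ j ∈ (pvP l).take m := by
        rw [List.take_add_one, List.mem_append, hPm]
        simp only [Option.toList_some, List.mem_singleton]
        exact or_iff_left hjp
      rw [if_congr hiff rfl rfl]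

-- ===== the permutation and sortedness facts =====
theorem pairwise_snd (f : Nat → Char) (n : Nat) :
    List.Pairwise (fun a b => a.2 < b.2)
      ((List.range n).map (fun j => (f j, (j : Int)))) := by
  refine List.pairwise_map.mpr (List.pairwise_lt_range.imp ?_)
  intro a b hab
  simp only []
  exact_mod_cast hab

theorem rank_injOn (l : List Char) (s : Nat) (hk : 0 < (pvP l).length) :
    ∀ a < l.length, ∀ b < l.length,
      pvRankU (pvP l) s (pvP l).length a = pvRankU (pvP l) s (pvP l).length b → a = b := by
  intro a _ b _ h
  simp only [pvRankU, List.take_length] at h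
  by_cases hap : a ∈ pvP l <;> by_cases hbp : b ∈ pvP l
  · rw [if_pos hap, if_pos hbp] at h
    have ea : (List.idxOf a (pvP l) + s) % (pvP l).length < (pvP l).length := Nat.mod_lt _ hk
    have eb : (List.idxOf b (pvP l) + s) % (pvP l).length < (pvP l).length := Nat.mod_lt _ hk
    have hidx := congrArg (fun x => List.idxOf x (pvP l)) h
    simp only [idxOf_getD (pvP_nodup l) ea, idxOf_getD (pvP_nodup l) eb] at hidx
    have := add_mod_cancel_lt (List.idxOf_lt_length_of_mem hap)
      (List.idxOf_lt_length_of_mem hbp) hidx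
    calc a = (pvP l).getD (List.idxOf a (pvP l)) 0 := (getD_idxOf hap).symm
      _ = (pvP l).getD (List.idxOf b (pvP l)) 0 := by rw [this]
      _ = b := getD_idxOf hbp
  · rw [if_pos hap, if_neg hbp] at h
    exact absurd (h ▸ getD_mem (Nat.mod_lt _ hk)) hbp
  · rw [if_neg hap, if_pos hbp] at h
    exact absurd (h ▸ getD_mem (Nat.mod_lt _ hk)) hap
  · rwa [if_neg hap, if_neg hbp] at h

theorem perm_LT (l : List Char) (s t : Nat) (hk : 0 < (pvP l).length)
    (hst : (s + t) % (pvP l).length = 0) :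
    ((List.range l.length).map (fun j => (pvOut l t j, (j : Int)))).Perm
      ((List.range l.length).map (fun j => (pvC l j, (pvRankU (pvP l) s (pvP l).length j : Int)))) := by
  have hnd := pvP_nodup l
  have hn1 : ((List.range l.length).map (fun j => (pvOut l t j, (j : Int)))).Nodup := by
    refine List.Nodup.map_on ?_ (List.nodup_range)
    intro x _ y _ hxy
    have h2 := congrArg (fun p => p.2) hxy
    simp only at h2
    exact_mod_cast h2
  have hn2 : ((List.range l.length).map
      (fun j => (pvC l j, (pvRankU (pvP l) s (pvP l).length j : Int)))).Nodup := by
    refine List.Nodup.map_on ?_ (List.nodup_range)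
    intro x hx y hy hxy
    have h2 := congrArg (fun p => p.2) hxy
    simp only [Int.natCast_inj] at h2
    exact rank_injOn l s hk x (List.mem_range.mp hx) y (List.mem_range.mp hy) h2
  rw [List.perm_ext_iff_of_nodup hn1 hn2]
  intro x
  simp only [List.mem_map, List.mem_range]
  constructor
  · rintro ⟨j, hj, rfl⟩
    by_cases hjp : j ∈ pvP l
    · have hij : List.idxOf j (pvP l) < (pvP l).length := List.idxOf_lt_length_of_mem hjp
      have hlt : (List.idxOf j (pvP l) + t) % (pvP l).length < (pvP l).length := Nat.mod_lt _ hk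
      refine ⟨(pvP l).getD ((List.idxOf j (pvP l) + t) % (pvP l).length) 0,
        pvP_lt (getD_mem hlt), ?_⟩
      have hmem : (pvP l).getD ((List.idxOf j (pvP l) + t) % (pvP l).length) 0 ∈ pvP l :=
        getD_mem hlt
      simp only [pvRankU, List.take_length, if_pos hmem, idxOf_getD hnd hlt, pvOut, if_pos hjp]
      rw [mod_shift_cancel hk hst hij, getD_idxOf hjp]
    · exact ⟨j, hj, by simp [pvOut, pvRankU, List.take_length, hjp]⟩
  · rintro ⟨j, hj, rfl⟩
    by_cases hjp : j ∈ pvP l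
    · have hij : List.idxOf j (pvP l) < (pvP l).length := List.idxOf_lt_length_of_mem hjp
      have hlt : (List.idxOf j (pvP l) + s) % (pvP l).length < (pvP l).length := Nat.mod_lt _ hk
      refine ⟨(pvP l).getD ((List.idxOf j (pvP l) + s) % (pvP l).length) 0,
        pvP_lt (getD_mem hlt), ?_⟩
      have hmem : (pvP l).getD ((List.idxOf j (pvP l) + s) % (pvP l).length) 0 ∈ pvP l :=
        getD_mem hlt
      have hts : (t + s) % (pvP l).length = 0 := by rwa [Nat.add_comm]
      simp only [pvOut, if_pos hmem, idxOf_getD hnd hlt, pvRankU, List.take_length, if_pos hjp]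
      rw [mod_shift_cancel hk hts hij, getD_idxOf hjp]
    · exact ⟨j, hj, by simp [pvOut, pvRankU, List.take_length, hjp]⟩

theorem perm_LT' (l : List Char) (s t : Nat)
    (hst : 0 < (pvP l).length → (s + t) % (pvP l).length = 0) :
    ((List.range l.length).map (fun j => (pvOut l t j, (j : Int)))).Perm
      ((List.range l.length).map
        (fun j => (pvC l j, (pvRankU (pvP l) s (pvP l).length j : Int)))) := by
  rcases Nat.eq_zero_or_pos (pvP l).length with hk | hk
  · have hP : pvP l = [] := List.eq_nil_of_length_eq_zero hk
    have heq : ((List.range l.length).map (fun j => (pvOut l t j, (j : Int))))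
        = ((List.range l.length).map
            (fun j => (pvC l j, (pvRankU (pvP l) s (pvP l).length j : Int)))) := by
      refine List.map_congr_left ?_
      intro j _
      simp [pvOut, pvRankU, hP]
    rw [heq]
  · exact perm_LT l s t hk (hst hk)

theorem A_eval (tin : String) (direction : String) :
    rule3_vowelMove tin direction =
      String.ofList ((List.range tin.toList.length).map
        (pvOut tin.toList (if direction = "left" then 1 else (pvP tin.toList).length - 1))) := by
  unfold rule3_vowelMove
  simp only [A_step1]
  simp only [A_step2]
  simp only [List.length_map]
  simp only [PySem.List.pyRange_zero_natCast]
  by_cases hd : direction = "left"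
  · simp only [hd, if_true]
    rw [A_loop tin.toList ((pvP tin.toList).length - 1) _
      (fun cur m hm => A_body_left tin.toList cur m hm) (pvP tin.toList).length le_rfl]
    rw [PySem.List.sorted_eq_of_perm_of_pairwise_lt _
      ((List.range tin.toList.length).map (fun j => (pvOut tin.toList 1 j, (j : Int)))) _
      (perm_LT' tin.toList ((pvP tin.toList).length - 1) 1
        (fun hk => by rw [Nat.sub_add_cancel hk]; exact Nat.mod_self _))
      (pairwise_snd _ _)]
    rw [PySem.List.foldl_append_singleton_eq_map]
    simp [List.map_map, Function.comp_def]
  · simp only [hd, if_false]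
    rw [A_loop tin.toList 1 _
      (fun cur m hm => A_body_right tin.toList cur m hm) (pvP tin.toList).length le_rfl]
    rw [PySem.List.sorted_eq_of_perm_of_pairwise_lt _
      ((List.range tin.toList.length).map
        (fun j => (pvOut tin.toList ((pvP tin.toList).length - 1) j, (j : Int)))) _
      (perm_LT' tin.toList 1 ((pvP tin.toList).length - 1)
        (fun hk => by
          rw [show 1 + ((pvP tin.toList).length - 1) = (pvP tin.toList).length from by omega]
          exact Nat.mod_self _))
      (pairwise_snd _ _)]
    rw [PySem.List.foldl_append_singleton_eq_map]
    simp [List.map_map, Function.comp_def]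

theorem B_eval (tin : String) (direction : String) :
    rule3_vowelMove_alt tin direction =
      String.ofList ((List.range tin.toList.length).map
        (pvOut tin.toList (if direction = "left" then 1 else (pvP tin.toList).length - 1))) := by
  unfold rule3_vowelMove_alt
  simp only [B_pos]
  have hvs : (((pvP tin.toList).map (fun j : Nat => (j : Int))).map
        (fun i => PySem.List.pyGetD tin.toList i ' '))
      = (pvP tin.toList).map (pvC tin.toList) := by
    rw [List.map_map]
    refine List.map_congr_left ?_
    intro j _
    simp [pvC]
  rw [hvs]
  rcases eq_or_ne (pvP tin.toList) [] with hP | hP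
  · simp only [hP, List.map_nil, ne_eq, not_true_eq_false, if_false,
      List.zip_nil_right, List.foldl_nil]
    refine congrArg String.ofList ?_
    conv_lhs => rw [← map_pvC tin.toList]
    refine List.map_congr_left ?_
    intro j _
    simp [pvOut, hP]
  · have hk : 0 < (pvP tin.toList).length := List.length_pos_of_ne_nil hP
    have hvne : (pvP tin.toList).map (pvC tin.toList) ≠ [] := by
      simpa [List.map_eq_nil_iff] using hP
    rw [if_pos hvne]
    by_cases hd : direction = "left"
    · simp only [hd, if_true]
      rw [PySem.List.slice_from_one, PySem.List.slice_to _ (by norm_num : (0 : Int) ≤ 1)]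
      rw [show ((1 : Int)).toNat = 1 from rfl, rot_left _ ' ' hvne]
      simp only [List.length_map]
      have hvv : (List.range (pvP tin.toList).length).map
            (fun i => ((pvP tin.toList).map (pvC tin.toList)).getD
              ((i + 1) % (pvP tin.toList).length) ' ')
          = (List.range (pvP tin.toList).length).map
            (fun i => pvC tin.toList ((pvP tin.toList).getD ((i + 1) % (pvP tin.toList).length) 0)) := by
        refine List.map_congr_left ?_
        intro i _
        rw [getD_map _ _ _ (Nat.mod_lt _ hk)]
      rw [hvv, map_eq_map_range (pvP tin.toList) (fun j : Nat => (j : Int)), List.zip_map']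
      rw [B_loop tin.toList 1 (pvP tin.toList).length le_rfl]
      simp only [List.take_length]
      refine congrArg String.ofList (List.map_congr_left ?_)
      intro j _
      simp [pvOut]
    · simp only [hd, if_false]
      rw [PySem.List.slice_from_neg_one, PySem.List.slice_to_neg_one]
      rw [rot_right _ ' ' hvne]
      simp only [List.length_map]
      have hvv : (List.range (pvP tin.toList).length).map
            (fun i => ((pvP tin.toList).map (pvC tin.toList)).getD
              ((i + ((pvP tin.toList).length - 1)) % (pvP tin.toList).length) ' ')
          = (List.range (pvP tin.toList).length).map
            (fun i => pvC tin.toList ((pvP tin.toList).getD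
              ((i + ((pvP tin.toList).length - 1)) % (pvP tin.toList).length) 0)) := by
        refine List.map_congr_left ?_
        intro i _
        rw [getD_map _ _ _ (Nat.mod_lt _ hk)]
      rw [hvv, map_eq_map_range (pvP tin.toList) (fun j : Nat => (j : Int)), List.zip_map']
      rw [B_loop tin.toList ((pvP tin.toList).length - 1) (pvP tin.toList).length le_rfl]
      simp only [List.take_length]
      refine congrArg String.ofList (List.map_congr_left ?_)
      intro j _
      simp [pvOut]

-- ===== VERDICT (by name: the statement is the Claim_ definition above) =====
theorem rule3_vowelMove_spec : Claim_equal_rule3_vowelMove := by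
  intro tin direction _
  show rule3_vowelMove tin direction = rule3_vowelMove_alt tin direction
  rw [A_eval, B_eval]
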